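-- pv_equiv track=rewrite | github.com/unitn-sml/CAN | src/semantic_loss/still_life/still_life_constraints_full.py | edge_constraints
-- ===== SOURCE A (Python) =====
-- import itertools
--
-- def n_k_combinations(n, k, indices):
--     """
--     Possible combination of n variables, with k of them being 1 and n-k 0.
--     :param n:
--     :return:
--     """
--
--     # indexes of k variables that are set to 1
--     k_indexes = list(itertools.permutations(range(n), k))
--     k_indexes = [tuple(sorted(el)) for el in k_indexes]
--     k_indexes = set(k_indexes)
--     possible_combinations = []
--
--     # for each K-tuple of indexes that should be set to 1, create an assignment
--     variables = "And(%s)"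
--     variables = variables % ",".join(["%sX.%s.%s" % ("%s", pair[0], pair[1]) for pair in indices])
--
--     for indexes in sorted(k_indexes):
--         # all values start as 0, 3 of them are set to 1
--         values = ["~" for _ in range(n)]
--         for index in indexes:
--             values[index] = ""
--         possible_combinations.append(variables % tuple(values))
--     possible_combinations = ",".join(possible_combinations)
--     return possible_combinations
--
-- def edge_constraints(N):
--     """
--     Constraints for still life edges written in sympy logic, the first variable
--     is to be considered the edge, the rest (5) are the other ones, for a total of six variables.
--
--     :return:
--     """
--     res = []
--
--     # if 0 then there cannot be 3 neighbours which are 1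
--     # Not(Or(all combinations of 3 variables to 1 and rest to 0))
--     edges = []
--     edges.extend([(0, i) for i in range(1, N - 1)])
--     edges.extend([(i, N - 1) for i in range(1, N - 1)])
--     edges.extend([(N - 1, i) for i in range(1, N - 1)])
--     edges.extend([(i, 0) for i in range(1, N - 1)])
--     for x, y in edges:
--         # top edge
--         if x == 0:
--             indices = [(x, y + 1), (x + 1, y + 1), (x + 1, y), (x + 1, y - 1), (x, y - 1)]
--         # right edge
--         if y == (N - 1):
--             indices = [(x + 1, y), (x + 1, y - 1), (x, y - 1), (x - 1, y - 1), (x - 1, y)]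
--         # bottom edge
--         if x == (N - 1):
--             indices = [(x, y + 1), (x, y - 1), (x - 1, y - 1), (x - 1, y), (x - 1, y + 1)]
--         # left edge
--         if y == 0:
--             indices = [(x - 1, y), (x - 1, y + 1), (x, y + 1), (x + 1, y + 1), (x + 1, y)]
--
--         ifzero = "Implies(~X.%s.%s, Nor(%s))" % (x, y, "%s")
--         ifzero = ifzero % n_k_combinations(5, 3, indices=indices)
--         res.append(ifzero)
--
--         ifone = "Implies(X.%s.%s, Nor(%s))" % (x, y, "%s")
--         excluded = [0, 1, 4, 5]
--         ifone = ifone % ",".join([n_k_combinations(5, i, indices=indices) for i in excluded])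
--         res.append(ifone)
--
--     return "\n".join(res)
-- ===== SOURCE B (Python) =====
-- import itertools
--
--
-- def n_k_combinations(n, k, indices):
--     """All assignments of n variables with exactly k of them set to 1,
--     enumerated directly with itertools.combinations (already sorted,
--     duplicate-free, lexicographic)."""
--     variables = "And(%s)"
--     variables = variables % ",".join(["%sX.%s.%s" % ("%s", pair[0], pair[1]) for pair in indices])
--     return ",".join(
--         variables % tuple("" if i in chosen else "~" for i in range(n))
--         for chosen in itertools.combinations(range(n), k)
--     )
--
--
-- def edge_constraints(N):
--     M = N - 1
--     sides = [
--         (lambda i: (0, i), [(0, 1), (1, 1), (1, 0), (1, -1), (0, -1)]),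
--         (lambda i: (i, M), [(1, 0), (1, -1), (0, -1), (-1, -1), (-1, 0)]),
--         (lambda i: (M, i), [(0, 1), (0, -1), (-1, -1), (-1, 0), (-1, 1)]),
--         (lambda i: (i, 0), [(-1, 0), (-1, 1), (0, 1), (1, 1), (1, 0)]),
--     ]
--     lines = []
--     for cell, offs in sides:
--         for i in range(1, M):
--             x, y = cell(i)
--             indices = [(x + dx, y + dy) for dx, dy in offs]
--             lines.append(f"Implies(~X.{x}.{y}, Nor({n_k_combinations(5, 3, indices)}))")
--             lines.append(f"Implies(X.{x}.{y}, Nor({','.join(n_k_combinations(5, k, indices) for k in (0, 1, 4, 5))}))")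
--     return "\n".join(lines)
-- ===== Notes on version B (the rewrite author's own statement) =====
-- stated objective: faster
-- what changed: n_k_combinations enumerates the k-subsets directly with itertools.combinations (already lexicographic and duplicate-free), eliminating A's enumerate-120-permutations / sort-each-tuple / set-dedup / sorted pass, and each cell's values list is built by a single membership comprehension instead of replicate-then-overwrite; the outer function replaces A's flat edge list with a four-way if-dispatch (and Python's leaked loop variable `indices`) by four per-side loops driven by neighbour-offset tables.
import Mathlib
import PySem

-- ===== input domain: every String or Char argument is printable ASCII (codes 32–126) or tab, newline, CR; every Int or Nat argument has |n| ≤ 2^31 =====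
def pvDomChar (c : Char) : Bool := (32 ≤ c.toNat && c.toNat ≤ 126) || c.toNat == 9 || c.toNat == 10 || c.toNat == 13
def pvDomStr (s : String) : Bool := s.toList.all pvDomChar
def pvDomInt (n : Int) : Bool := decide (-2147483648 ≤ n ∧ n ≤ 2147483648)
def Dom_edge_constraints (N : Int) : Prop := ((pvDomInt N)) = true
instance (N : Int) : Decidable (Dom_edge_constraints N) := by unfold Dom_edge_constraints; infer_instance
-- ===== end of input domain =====

-- B replaces A's permutations-then-sort-then-dedup enumeration of the k-subsets by a direct
-- lexicographic combinations enumeration, and replaces A's flat edge list with a four-branch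
-- if-dispatch by four per-side loops with neighbour-offset tables (objective: faster, constant factor).

-- ===== PORT A =====
-- Python '%'-formatting: scan the format left to right, each '%s' consumes the next value
-- (the inserted value itself is not rescanned). Exact for the '%s'-only formats used here.
def fmtSubst : List Char → List String → List Char
  | [], _ => []
  | c :: rest, vs =>
    if c = '%' then
      match rest, vs with
      | 's' :: r, v :: rem => v.toList ++ fmtSubst r rem
      | r, vs' => c :: fmtSubst r vs'
    else c :: fmtSubst rest vs

-- itertools.permutations(pool, r): for each element in pool order, prepend it to the
-- r-1 permutations of the remaining pool.
def permsA : List Int → Nat → List (List Int)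
  | _, 0 => [[]]
  | pool, r + 1 => pool.flatMap (fun x => (permsA (pool.erase x) r).map (fun t => x :: t))

-- n_k_combinations; k is passed via .toNat to itertools.permutations (A only calls it
-- with the literal non-negative ks 0, 1, 3, 4, 5).
def n_k_combinationsA (n k : Int) (indices : List (Int × Int)) : String :=
  let k_indexes0 := permsA (PySem.List.pyRange 0 n 1) k.toNat
  let k_indexes1 := k_indexes0.map (fun el => PySem.List.sorted el (fun x => x) false)
  let k_indexes : List (List Int) := PySem.Set.ofList k_indexes1
  let vars := fmtSubst "And(%s)".toList
      [PySem.Str.join "," (indices.map (fun pair =>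
        String.ofList (fmtSubst "%sX.%s.%s".toList ["%s", PySem.Int.toStr pair.1, PySem.Int.toStr pair.2])))]
  let possible_combinations := (PySem.List.sorted k_indexes (fun x => x) false).map (fun indexes =>
    let values := (PySem.List.pyRange 0 n 1).map (fun _ => "~")
    let values := indexes.foldl (fun vs index => PySem.List.pySetD vs index "") values
    String.ofList (fmtSubst vars values))
  PySem.Str.join "," possible_combinations

def edge_constraints (N : Int) : String :=
  let edges : List (Int × Int) :=
    (PySem.List.pyRange 1 (N - 1) 1).map (fun i => ((0 : Int), i))
    ++ (PySem.List.pyRange 1 (N - 1) 1).map (fun i => (i, N - 1))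
    ++ (PySem.List.pyRange 1 (N - 1) 1).map (fun i => (N - 1, i))
    ++ (PySem.List.pyRange 1 (N - 1) 1).map (fun i => (i, (0 : Int)))
  -- state = (res, indices): Python's `indices` survives across iterations, so it is threaded.
  let st := edges.foldl (fun (st : List String × List (Int × Int)) xy =>
    let x := xy.1
    let y := xy.2
    let indices := if x = 0 then [(x, y + 1), (x + 1, y + 1), (x + 1, y), (x + 1, y - 1), (x, y - 1)] else st.2
    let indices := if y = N - 1 then [(x + 1, y), (x + 1, y - 1), (x, y - 1), (x - 1, y - 1), (x - 1, y)] else indices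
    let indices := if x = N - 1 then [(x, y + 1), (x, y - 1), (x - 1, y - 1), (x - 1, y), (x - 1, y + 1)] else indices
    let indices := if y = 0 then [(x - 1, y), (x - 1, y + 1), (x, y + 1), (x + 1, y + 1), (x + 1, y)] else indices
    let ifzero := String.ofList (fmtSubst
      (fmtSubst "Implies(~X.%s.%s, Nor(%s))".toList [PySem.Int.toStr x, PySem.Int.toStr y, "%s"])
      [n_k_combinationsA 5 3 indices])
    let ifone := String.ofList (fmtSubst
      (fmtSubst "Implies(X.%s.%s, Nor(%s))".toList [PySem.Int.toStr x, PySem.Int.toStr y, "%s"])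
      [PySem.Str.join "," ([(0 : Int), 1, 4, 5].map (fun i => n_k_combinationsA 5 i indices))])
    (st.1 ++ [ifzero, ifone], indices)) ([], [])
  PySem.Str.join "\n" st.1

-- ===== PORT B =====
-- itertools.combinations(pool, r): those containing the head, then those that do not.
def combosB : List Int → Nat → List (List Int)
  | _, 0 => [[]]
  | [], _ + 1 => []
  | x :: xs, r + 1 => ((combosB xs r).map (fun t => x :: t)) ++ combosB xs (r + 1)

def n_k_combinationsB (n k : Int) (indices : List (Int × Int)) : String :=
  let vars := fmtSubst "And(%s)".toList
      [PySem.Str.join "," (indices.map (fun pair =>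
        String.ofList (fmtSubst "%sX.%s.%s".toList ["%s", PySem.Int.toStr pair.1, PySem.Int.toStr pair.2])))]
  PySem.Str.join "," ((combosB (PySem.List.pyRange 0 n 1) k.toNat).map (fun chosen =>
    String.ofList (fmtSubst vars
      ((PySem.List.pyRange 0 n 1).map (fun i => if i ∈ chosen then "" else "~")))))

def edge_constraints_alt (N : Int) : String :=
  let M := N - 1
  let sides : List ((Int → Int × Int) × List (Int × Int)) :=
    [ (fun i => (0, i), [(0, 1), (1, 1), (1, 0), (1, -1), (0, -1)]),
      (fun i => (i, M), [(1, 0), (1, -1), (0, -1), (-1, -1), (-1, 0)]),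
      (fun i => (M, i), [(0, 1), (0, -1), (-1, -1), (-1, 0), (-1, 1)]),
      (fun i => (i, 0), [(-1, 0), (-1, 1), (0, 1), (1, 1), (1, 0)]) ]
  let lines := sides.foldl (fun lines side =>
    (PySem.List.pyRange 1 M 1).foldl (fun lines i =>
      let xy := side.1 i
      let x := xy.1
      let y := xy.2
      let indices := side.2.map (fun o => (x + o.1, y + o.2))
      -- f-strings, built left to right
      let line1 := String.ofList ("Implies(~X.".toList ++ (PySem.Int.toStr x).toList ++ ".".toList
        ++ (PySem.Int.toStr y).toList ++ ", Nor(".toList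
        ++ (n_k_combinationsB 5 3 indices).toList ++ "))".toList)
      let line2 := String.ofList ("Implies(X.".toList ++ (PySem.Int.toStr x).toList ++ ".".toList
        ++ (PySem.Int.toStr y).toList ++ ", Nor(".toList
        ++ (PySem.Str.join "," ([(0 : Int), 1, 4, 5].map (fun k => n_k_combinationsB 5 k indices))).toList
        ++ "))".toList)
      lines ++ [line1, line2]) lines) ([] : List String)
  PySem.Str.join "\n" lines

-- ===== PRECONDITION & SPEC =====
def Spec_edge_constraints (N : Int) (out : String) : Prop := out = edge_constraints_alt N
instance (N : Int) (out : String) : Decidable (Spec_edge_constraints N out) := by unfold Spec_edge_constraints; infer_instance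

-- ===== CLAIM (what is proved, stated in full; the proofs are below) =====
def Claim_equal_edge_constraints : Prop := ∀ (N : Int), Dom_edge_constraints N → Spec_edge_constraints N (edge_constraints N)

-- ===== LEMMAS AND PROOFS =====

-- proof-side copies of the port internals (used only to name subterms; equal by rfl)
def edgesA (N : Int) : List (Int × Int) :=
  (PySem.List.pyRange 1 (N - 1) 1).map (fun i => ((0 : Int), i))
  ++ (PySem.List.pyRange 1 (N - 1) 1).map (fun i => (i, N - 1))
  ++ (PySem.List.pyRange 1 (N - 1) 1).map (fun i => (N - 1, i))
  ++ (PySem.List.pyRange 1 (N - 1) 1).map (fun i => (i, (0 : Int)))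

def fA (N : Int) : List String × List (Int × Int) → Int × Int → List String × List (Int × Int) :=
  fun st xy =>
    let x := xy.1
    let y := xy.2
    let indices := if x = 0 then [(x, y + 1), (x + 1, y + 1), (x + 1, y), (x + 1, y - 1), (x, y - 1)] else st.2
    let indices := if y = N - 1 then [(x + 1, y), (x + 1, y - 1), (x, y - 1), (x - 1, y - 1), (x - 1, y)] else indices
    let indices := if x = N - 1 then [(x, y + 1), (x, y - 1), (x - 1, y - 1), (x - 1, y), (x - 1, y + 1)] else indices
    let indices := if y = 0 then [(x - 1, y), (x - 1, y + 1), (x, y + 1), (x + 1, y + 1), (x + 1, y)] else indices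
    let ifzero := String.ofList (fmtSubst
      (fmtSubst "Implies(~X.%s.%s, Nor(%s))".toList [PySem.Int.toStr x, PySem.Int.toStr y, "%s"])
      [n_k_combinationsA 5 3 indices])
    let ifone := String.ofList (fmtSubst
      (fmtSubst "Implies(X.%s.%s, Nor(%s))".toList [PySem.Int.toStr x, PySem.Int.toStr y, "%s"])
      [PySem.Str.join "," ([(0 : Int), 1, 4, 5].map (fun i => n_k_combinationsA 5 i indices))])
    (st.1 ++ [ifzero, ifone], indices)

-- the indices value A's four sequential conditional assignments leave behind (last write wins)
def indA (N x y : Int) : List (Int × Int) :=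
  if y = 0 then [(x - 1, y), (x - 1, y + 1), (x, y + 1), (x + 1, y + 1), (x + 1, y)]
  else if x = N - 1 then [(x, y + 1), (x, y - 1), (x - 1, y - 1), (x - 1, y), (x - 1, y + 1)]
  else if y = N - 1 then [(x + 1, y), (x + 1, y - 1), (x, y - 1), (x - 1, y - 1), (x - 1, y)]
  else [(x, y + 1), (x + 1, y + 1), (x + 1, y), (x + 1, y - 1), (x, y - 1)]

def zA (x y : Int) (ind : List (Int × Int)) : String :=
  String.ofList (fmtSubst
    (fmtSubst "Implies(~X.%s.%s, Nor(%s))".toList [PySem.Int.toStr x, PySem.Int.toStr y, "%s"])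
    [n_k_combinationsA 5 3 ind])

def oA (x y : Int) (ind : List (Int × Int)) : String :=
  String.ofList (fmtSubst
    (fmtSubst "Implies(X.%s.%s, Nor(%s))".toList [PySem.Int.toStr x, PySem.Int.toStr y, "%s"])
    [PySem.Str.join "," ([(0 : Int), 1, 4, 5].map (fun i => n_k_combinationsA 5 i ind))])

def gA (N : Int) (xy : Int × Int) : List String :=
  [zA xy.1 xy.2 (indA N xy.1 xy.2), oA xy.1 xy.2 (indA N xy.1 xy.2)]

-- B-side strings
def lineB1 (x y : Int) (ind : List (Int × Int)) : String :=
  String.ofList ("Implies(~X.".toList ++ (PySem.Int.toStr x).toList ++ ".".toList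
    ++ (PySem.Int.toStr y).toList ++ ", Nor(".toList
    ++ (n_k_combinationsB 5 3 ind).toList ++ "))".toList)

def lineB2 (x y : Int) (ind : List (Int × Int)) : String :=
  String.ofList ("Implies(X.".toList ++ (PySem.Int.toStr x).toList ++ ".".toList
    ++ (PySem.Int.toStr y).toList ++ ", Nor(".toList
    ++ (PySem.Str.join "," ([(0 : Int), 1, 4, 5].map (fun k => n_k_combinationsB 5 k ind))).toList
    ++ "))".toList)

def gB (x y : Int) (offs : List (Int × Int)) : List String :=
  let ind := offs.map (fun o => (x + o.1, y + o.2))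
  [lineB1 x y ind, lineB2 x y ind]

def offs1 : List (Int × Int) := [(0, 1), (1, 1), (1, 0), (1, -1), (0, -1)]
def offs2 : List (Int × Int) := [(1, 0), (1, -1), (0, -1), (-1, -1), (-1, 0)]
def offs3 : List (Int × Int) := [(0, 1), (0, -1), (-1, -1), (-1, 0), (-1, 1)]
def offs4 : List (Int × Int) := [(-1, 0), (-1, 1), (0, 1), (1, 1), (1, 0)]

-- fmtSubst lemmas
theorem fmtSubst_cons_ne (c : Char) (rest : List Char) (vs : List String) (hc : c ≠ '%') :
    fmtSubst (c :: rest) vs = c :: fmtSubst rest vs := by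
  rw [fmtSubst.eq_def]
  simp only [if_neg hc]

theorem fmtSubst_append_no (l1 l2 : List Char) (vs : List String) (h : '%' ∉ l1) :
    fmtSubst (l1 ++ l2) vs = l1 ++ fmtSubst l2 vs := by
  induction l1 with
  | nil => simp
  | cons c t ih =>
    have hc : c ≠ '%' := fun e => h (e ▸ List.mem_cons_self ..)
    simp only [List.cons_append, fmtSubst_cons_ne c _ _ hc, ih (fun m => h (List.mem_cons_of_mem _ m))]

theorem no_pct_toStr (n : Int) : '%' ∉ (PySem.Int.toStr n).toList := by
  rw [PySem.Int.toList_toStr]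
  unfold PySem.Int.toChars
  split <;> intro h
  · rcases List.mem_cons.1 h with h | h
    · exact absurd h (by decide)
    · have := Nat.isDigit_of_mem_toDigits (by norm_num) (by norm_num) h
      simp [Char.isDigit] at this
  · have := Nat.isDigit_of_mem_toDigits (by norm_num) (by norm_num) h
    simp [Char.isDigit] at this

theorem fmt_z (a b c : String) (ha : '%' ∉ a.toList) (hb : '%' ∉ b.toList) :
    fmtSubst (fmtSubst "Implies(~X.%s.%s, Nor(%s))".toList [a, b, "%s"]) [c]
      = "Implies(~X.".toList ++ a.toList ++ ".".toList ++ b.toList ++ ", Nor(".toList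
        ++ c.toList ++ "))".toList := by
  have h1 : fmtSubst "Implies(~X.%s.%s, Nor(%s))".toList [a, b, "%s"]
      = "Implies(~X.".toList ++ (a.toList ++ (".".toList ++ (b.toList ++ (", Nor(".toList
        ++ (('%' :: 's' :: []) ++ "))".toList))))) := by
    simp [fmtSubst]
  rw [h1]
  rw [fmtSubst_append_no _ _ _ (by decide), fmtSubst_append_no _ _ _ ha,
      fmtSubst_append_no _ _ _ (by decide), fmtSubst_append_no _ _ _ hb,
      fmtSubst_append_no _ _ _ (by decide)]
  rw [show fmtSubst (('%' :: 's' :: []) ++ "))".toList) [c] = c.toList ++ "))".toList from rfl]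
  simp [List.append_assoc]

theorem fmt_o (a b c : String) (ha : '%' ∉ a.toList) (hb : '%' ∉ b.toList) :
    fmtSubst (fmtSubst "Implies(X.%s.%s, Nor(%s))".toList [a, b, "%s"]) [c]
      = "Implies(X.".toList ++ a.toList ++ ".".toList ++ b.toList ++ ", Nor(".toList
        ++ c.toList ++ "))".toList := by
  have h1 : fmtSubst "Implies(X.%s.%s, Nor(%s))".toList [a, b, "%s"]
      = "Implies(X.".toList ++ (a.toList ++ (".".toList ++ (b.toList ++ (", Nor(".toList
        ++ (('%' :: 's' :: []) ++ "))".toList))))) := by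
    simp [fmtSubst]
  rw [h1]
  rw [fmtSubst_append_no _ _ _ (by decide), fmtSubst_append_no _ _ _ ha,
      fmtSubst_append_no _ _ _ (by decide), fmtSubst_append_no _ _ _ hb,
      fmtSubst_append_no _ _ _ (by decide)]
  rw [show fmtSubst (('%' :: 's' :: []) ++ "))".toList) [c] = c.toList ++ "))".toList from rfl]
  simp [List.append_assoc]

-- the k-subset enumerations agree (closed computations, one per k A uses)
set_option maxRecDepth 10000 in
theorem combEq0 :
    PySem.List.sorted (PySem.Set.ofList ((permsA (PySem.List.pyRange 0 5 1) (0 : Int).toNat).map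
      (fun el => PySem.List.sorted el (fun x => x) false)) : List (List Int)) (fun x => x) false
    = combosB (PySem.List.pyRange 0 5 1) (0 : Int).toNat := by decide
set_option maxRecDepth 10000 in
theorem combEq1 :
    PySem.List.sorted (PySem.Set.ofList ((permsA (PySem.List.pyRange 0 5 1) (1 : Int).toNat).map
      (fun el => PySem.List.sorted el (fun x => x) false)) : List (List Int)) (fun x => x) false
    = combosB (PySem.List.pyRange 0 5 1) (1 : Int).toNat := by decide
set_option maxRecDepth 10000 in
theorem combEq3 :
    PySem.List.sorted (PySem.Set.ofList ((permsA (PySem.List.pyRange 0 5 1) (3 : Int).toNat).map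
      (fun el => PySem.List.sorted el (fun x => x) false)) : List (List Int)) (fun x => x) false
    = combosB (PySem.List.pyRange 0 5 1) (3 : Int).toNat := by decide
set_option maxRecDepth 100000 in
theorem combEq4 :
    PySem.List.sorted (PySem.Set.ofList ((permsA (PySem.List.pyRange 0 5 1) (4 : Int).toNat).map
      (fun el => PySem.List.sorted el (fun x => x) false)) : List (List Int)) (fun x => x) false
    = combosB (PySem.List.pyRange 0 5 1) (4 : Int).toNat := by decide
set_option maxRecDepth 100000 in
theorem combEq5 :
    PySem.List.sorted (PySem.Set.ofList ((permsA (PySem.List.pyRange 0 5 1) (5 : Int).toNat).map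
      (fun el => PySem.List.sorted el (fun x => x) false)) : List (List Int)) (fun x => x) false
    = combosB (PySem.List.pyRange 0 5 1) (5 : Int).toNat := by decide

-- the per-subset values lists agree (closed, finitely many subsets per k)
set_option maxRecDepth 10000 in
theorem hval0 : ∀ c ∈ combosB (PySem.List.pyRange 0 5 1) (0 : Int).toNat,
    (c.foldl (fun vs index => PySem.List.pySetD vs index "") ((PySem.List.pyRange 0 5 1).map (fun _ => "~")))
      = ((PySem.List.pyRange 0 5 1).map (fun i => if i ∈ c then "" else "~")) := by decide
set_option maxRecDepth 10000 in
theorem hval1 : ∀ c ∈ combosB (PySem.List.pyRange 0 5 1) (1 : Int).toNat,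
    (c.foldl (fun vs index => PySem.List.pySetD vs index "") ((PySem.List.pyRange 0 5 1).map (fun _ => "~")))
      = ((PySem.List.pyRange 0 5 1).map (fun i => if i ∈ c then "" else "~")) := by decide
set_option maxRecDepth 10000 in
theorem hval3 : ∀ c ∈ combosB (PySem.List.pyRange 0 5 1) (3 : Int).toNat,
    (c.foldl (fun vs index => PySem.List.pySetD vs index "") ((PySem.List.pyRange 0 5 1).map (fun _ => "~")))
      = ((PySem.List.pyRange 0 5 1).map (fun i => if i ∈ c then "" else "~")) := by decide
set_option maxRecDepth 10000 in
theorem hval4 : ∀ c ∈ combosB (PySem.List.pyRange 0 5 1) (4 : Int).toNat,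
    (c.foldl (fun vs index => PySem.List.pySetD vs index "") ((PySem.List.pyRange 0 5 1).map (fun _ => "~")))
      = ((PySem.List.pyRange 0 5 1).map (fun i => if i ∈ c then "" else "~")) := by decide
set_option maxRecDepth 10000 in
theorem hval5 : ∀ c ∈ combosB (PySem.List.pyRange 0 5 1) (5 : Int).toNat,
    (c.foldl (fun vs index => PySem.List.pySetD vs index "") ((PySem.List.pyRange 0 5 1).map (fun _ => "~")))
      = ((PySem.List.pyRange 0 5 1).map (fun i => if i ∈ c then "" else "~")) := by decide

theorem nk_eq_0 (ind : List (Int × Int)) : n_k_combinationsA 5 0 ind = n_k_combinationsB 5 0 ind := by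
  simp only [n_k_combinationsA, n_k_combinationsB]
  rw [combEq0]
  refine congrArg _ (List.map_congr_left ?_)
  intro c hc
  rw [hval0 c hc]

theorem nk_eq_1 (ind : List (Int × Int)) : n_k_combinationsA 5 1 ind = n_k_combinationsB 5 1 ind := by
  simp only [n_k_combinationsA, n_k_combinationsB]
  rw [combEq1]
  refine congrArg _ (List.map_congr_left ?_)
  intro c hc
  rw [hval1 c hc]

theorem nk_eq_3 (ind : List (Int × Int)) : n_k_combinationsA 5 3 ind = n_k_combinationsB 5 3 ind := by
  simp only [n_k_combinationsA, n_k_combinationsB]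
  rw [combEq3]
  refine congrArg _ (List.map_congr_left ?_)
  intro c hc
  rw [hval3 c hc]

theorem nk_eq_4 (ind : List (Int × Int)) : n_k_combinationsA 5 4 ind = n_k_combinationsB 5 4 ind := by
  simp only [n_k_combinationsA, n_k_combinationsB]
  rw [combEq4]
  refine congrArg _ (List.map_congr_left ?_)
  intro c hc
  rw [hval4 c hc]

theorem nk_eq_5 (ind : List (Int × Int)) : n_k_combinationsA 5 5 ind = n_k_combinationsB 5 5 ind := by
  simp only [n_k_combinationsA, n_k_combinationsB]
  rw [combEq5]
  refine congrArg _ (List.map_congr_left ?_)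
  intro c hc
  rw [hval5 c hc]

-- the two per-cell strings agree for every x, y, indices
theorem z_eq (x y : Int) (ind : List (Int × Int)) : zA x y ind = lineB1 x y ind := by
  unfold zA lineB1
  rw [fmt_z _ _ _ (no_pct_toStr x) (no_pct_toStr y), nk_eq_3]

theorem o_eq (x y : Int) (ind : List (Int × Int)) : oA x y ind = lineB2 x y ind := by
  unfold oA lineB2
  rw [fmt_o _ _ _ (no_pct_toStr x) (no_pct_toStr y)]
  simp only [List.map_cons, List.map_nil, nk_eq_0, nk_eq_1, nk_eq_4, nk_eq_5]

-- A's fold, on lists all of whose members determine their indices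
theorem A_foldl (N : Int) (l : List (Int × Int))
    (hl : ∀ xy ∈ l, ∀ st, fA N st xy = (st.1 ++ gA N xy, indA N xy.1 xy.2)) :
    ∀ acc s0, (List.foldl (fA N) (acc, s0) l).1 = acc ++ l.flatMap (gA N) := by
  induction l with
  | nil => intro acc s0; simp
  | cons a l ih =>
    intro acc s0
    rw [List.foldl_cons, hl a (List.mem_cons_self ..) (acc, s0)]
    rw [ih (fun xy h st => hl xy (List.mem_cons_of_mem _ h) st)]
    simp [List.append_assoc]

theorem B_foldl (f1 f2 : Int → String) (l : List Int) :
    ∀ acc, List.foldl (fun lines i => lines ++ [f1 i, f2 i]) acc l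
      = acc ++ l.flatMap (fun i => [f1 i, f2 i]) := by
  induction l with
  | nil => intro acc; simp
  | cons a l ih => intro acc; rw [List.foldl_cons, ih]; simp

theorem flatMap_congr_mem {α β : Type} (l : List α) (f g : α → List β)
    (h : ∀ a ∈ l, f a = g a) : l.flatMap f = l.flatMap g := by
  induction l with
  | nil => rfl
  | cons a l ih =>
    simp only [List.flatMap_cons, h a (List.mem_cons_self ..),
      ih (fun x hx => h x (List.mem_cons_of_mem _ hx))]

-- each edge family: A's dispatched indices and strings = B's offset-table indices and strings
theorem fam1 (N i : Int) (h1 : 1 ≤ i) (h2 : i < N - 1) : gA N (0, i) = gB 0 i offs1 := by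
  have hx : indA N 0 i = offs1.map (fun o => ((0 : Int) + o.1, i + o.2)) := by
    unfold indA offs1
    rw [if_neg (by omega), if_neg (by omega : ¬ (0 : Int) = N - 1), if_neg (by omega)]
    norm_num [Int.sub_eq_add_neg]
  unfold gA gB
  simp only [hx, z_eq, o_eq]

theorem fam2 (N i : Int) (h1 : 1 ≤ i) (h2 : i < N - 1) : gA N (i, N - 1) = gB i (N - 1) offs2 := by
  have hx : indA N i (N - 1) = offs2.map (fun o => (i + o.1, (N - 1) + o.2)) := by
    unfold indA offs2
    rw [if_neg (by omega), if_neg (by omega), if_pos rfl]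
    norm_num [Int.sub_eq_add_neg]
  unfold gA gB
  simp only [hx, z_eq, o_eq]

theorem fam3 (N i : Int) (h1 : 1 ≤ i) (_h2 : i < N - 1) : gA N (N - 1, i) = gB (N - 1) i offs3 := by
  have hx : indA N (N - 1) i = offs3.map (fun o => ((N - 1) + o.1, i + o.2)) := by
    unfold indA offs3
    rw [if_neg (by omega), if_pos rfl]
    norm_num [Int.sub_eq_add_neg]
  unfold gA gB
  simp only [hx, z_eq, o_eq]

theorem fam4 (N i : Int) (_h1 : 1 ≤ i) (_h2 : i < N - 1) : gA N (i, 0) = gB i 0 offs4 := by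
  have hx : indA N i 0 = offs4.map (fun o => (i + o.1, (0 : Int) + o.2)) := by
    unfold indA offs4
    rw [if_pos rfl]
    norm_num [Int.sub_eq_add_neg]
  unfold gA gB
  simp only [hx, z_eq, o_eq]

-- members of each family resolve A's four conditional assignments independently of the carried state
theorem goodEdges (N : Int) : ∀ xy ∈ edgesA N, ∀ st,
    fA N st xy = (st.1 ++ gA N xy, indA N xy.1 xy.2) := by
  intro xy hxy st
  unfold edgesA at hxy
  simp only [List.mem_append, List.mem_map, PySem.List.mem_pyRange_one] at hxy
  unfold fA gA zA oA indA
  rcases hxy with ((⟨i, ⟨hi1, hi2⟩, rfl⟩ | ⟨i, ⟨hi1, hi2⟩, rfl⟩) | ⟨i, ⟨hi1, hi2⟩, rfl⟩) | ⟨i, ⟨hi1, hi2⟩, rfl⟩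
  · -- top: (0, i)
    simp [show ¬(i = 0) from by omega, show ¬((0 : Int) = N - 1) from by omega,
      show ¬(i = N - 1) from by omega]
  · -- right: (i, N - 1)
    simp [show ¬(N - 1 = 0) from by omega, show ¬(i = N - 1) from by omega]
  · -- bottom: (N - 1, i)
    simp [show ¬(i = 0) from by omega]
  · -- left: (i, 0)
    simp

theorem main_eq (N : Int) : edge_constraints N = edge_constraints_alt N := by
  have hA : edge_constraints N
      = PySem.Str.join "\n" (List.foldl (fA N) (([] : List String), ([] : List (Int × Int))) (edgesA N)).1 := rfl
  have hB : edge_constraints_alt N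
      = PySem.Str.join "\n"
          (List.foldl (fun lines i => lines ++ [lineB1 0 i (offs1.map (fun o => ((0 : Int) + o.1, i + o.2))),
              lineB2 0 i (offs1.map (fun o => ((0 : Int) + o.1, i + o.2)))])
            ([] : List String) (PySem.List.pyRange 1 (N - 1) 1)
          |> (fun acc => List.foldl (fun lines i => lines ++ [lineB1 i (N - 1) (offs2.map (fun o => (i + o.1, (N - 1) + o.2))),
              lineB2 i (N - 1) (offs2.map (fun o => (i + o.1, (N - 1) + o.2)))]) acc (PySem.List.pyRange 1 (N - 1) 1))
          |> (fun acc => List.foldl (fun lines i => lines ++ [lineB1 (N - 1) i (offs3.map (fun o => ((N - 1) + o.1, i + o.2))),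
              lineB2 (N - 1) i (offs3.map (fun o => ((N - 1) + o.1, i + o.2)))]) acc (PySem.List.pyRange 1 (N - 1) 1))
          |> (fun acc => List.foldl (fun lines i => lines ++ [lineB1 i 0 (offs4.map (fun o => (i + o.1, (0 : Int) + o.2))),
              lineB2 i 0 (offs4.map (fun o => (i + o.1, (0 : Int) + o.2)))]) acc (PySem.List.pyRange 1 (N - 1) 1))) := rfl
  rw [hA, hB]
  rw [A_foldl N (edgesA N) (goodEdges N) [] []]
  simp only [B_foldl]
  unfold edgesA
  simp only [List.flatMap_append, List.flatMap_map, List.nil_append]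
  rw [flatMap_congr_mem _ _ (fun i => gB 0 i offs1) ?h1,
      flatMap_congr_mem _ (fun i => gA N (i, N - 1)) (fun i => gB i (N - 1) offs2) ?h2,
      flatMap_congr_mem _ (fun i => gA N (N - 1, i)) (fun i => gB (N - 1) i offs3) ?h3,
      flatMap_congr_mem _ (fun i => gA N (i, 0)) (fun i => gB i 0 offs4) ?h4]
  case h1 => intro i hi; rw [PySem.List.mem_pyRange_one] at hi; exact fam1 N i hi.1 hi.2
  case h2 => intro i hi; rw [PySem.List.mem_pyRange_one] at hi; exact fam2 N i hi.1 hi.2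
  case h3 => intro i hi; rw [PySem.List.mem_pyRange_one] at hi; exact fam3 N i hi.1 hi.2
  case h4 => intro i hi; rw [PySem.List.mem_pyRange_one] at hi; exact fam4 N i hi.1 hi.2
  · unfold gB
    simp [List.append_assoc]

-- ===== VERDICT (by name: the statement is the Claim_ definition above) =====
theorem edge_constraints_spec : Claim_equal_edge_constraints := by
  intro N _
  unfold Spec_edge_constraints
  exact main_eq N
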